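-- pv_equiv track=rewrite | github.com/andresestrella/minnek-test | task1.py | reverseArrayChars
-- ===== SOURCE A (Python) =====
-- def reverseArrayChars(array):
--     if len(array) == 0:
--         return array
--
--     left = 0
--     right = len(array) - 1
--
--     while left <= right:
--         leftVal = str(array[left])
--         rightVal = str(array[right])
--         if leftVal.isalnum() and rightVal.isalnum():
--             array[left], array[right] = array[right], array[left]
--             left += 1
--             right -= 1
--
--         elif not leftVal.isalnum():
--             left += 1
--
--         elif not rightVal.isalnum():
--             right -= 1
--     return array
-- ===== SOURCE B (Python) =====
-- def reverseArrayChars(array):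
--     idx = [i for i, x in enumerate(array) if str(x).isalnum()]
--     vals = [array[i] for i in reversed(idx)]
--     for i, v in zip(idx, vals):
--         array[i] = v
--     return array
-- ===== Notes on version B (the rewrite author's own statement) =====
-- stated objective: simpler
-- what changed: Replaced the interleaved branchy two-pointer swap loop with a collect-positions pass, a gather of the alnum values in reverse order, and a straight scatter pass.
import Mathlib
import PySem

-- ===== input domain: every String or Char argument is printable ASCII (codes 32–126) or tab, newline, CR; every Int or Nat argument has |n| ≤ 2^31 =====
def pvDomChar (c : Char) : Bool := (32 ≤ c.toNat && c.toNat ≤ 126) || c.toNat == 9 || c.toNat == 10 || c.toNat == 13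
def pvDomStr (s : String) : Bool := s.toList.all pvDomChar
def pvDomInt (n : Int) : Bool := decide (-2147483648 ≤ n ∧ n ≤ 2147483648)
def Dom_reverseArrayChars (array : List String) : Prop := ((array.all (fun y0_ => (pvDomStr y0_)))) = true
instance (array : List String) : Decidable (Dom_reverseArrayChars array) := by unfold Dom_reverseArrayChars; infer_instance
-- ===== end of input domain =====

-- B replaces A's interleaved two-pointer swap loop by collect-positions / gather-reversed-values /
-- scatter (objective: simpler). Both Pythons mutate `array` in place and return the same object;
-- the equivalence proved here is about the RETURN value (the final list contents are identical too).

-- ===== PORT A =====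
-- the while loop of A: state (arr, left, right); the `| _, _ => arr` arm only totalizes the
-- indexing (indices are always in range while left ≤ right), it is never reached from the entry call
def pvLoopA (arr : List String) (l r : Int) : List String :=
  if _h : l ≤ r then
    match PySem.List.pyGet? arr l, PySem.List.pyGet? arr r with
    | some lv, some rv =>
      if PySem.Str.strIsalnum lv && PySem.Str.strIsalnum rv then
        pvLoopA (PySem.List.pySetD (PySem.List.pySetD arr l rv) r lv) (l + 1) (r - 1)
      else if !PySem.Str.strIsalnum lv then
        pvLoopA arr (l + 1) r
      else if !PySem.Str.strIsalnum rv then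
        pvLoopA arr l (r - 1)
      else arr
    | _, _ => arr
  else arr
termination_by (r + 1 - l).toNat
decreasing_by all_goals (simp_wf; omega)

def reverseArrayChars (array : List String) : List String :=
  if array.length == 0 then array
  else pvLoopA array 0 ((array.length : Int) - 1)

-- ===== PORT B =====
def reverseArrayChars_alt (array : List String) : List String :=
  let idx := ((PySem.List.enumerate array).filter (fun p => PySem.Str.strIsalnum p.2)).map Prod.fst
  let vals := idx.reverse.map (fun i => PySem.List.pyGetD array i "")
  (idx.zip vals).foldl (fun a p => PySem.List.pySetD a p.1 p.2) array

-- ===== PRECONDITION & SPEC =====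
def Spec_reverseArrayChars (array : List String) (out : List String) : Prop := out = reverseArrayChars_alt array
instance (array : List String) (out : List String) : Decidable (Spec_reverseArrayChars array out) := by unfold Spec_reverseArrayChars; infer_instance

-- ===== CLAIM (what is proved, stated in full; the proofs are below) =====
def Claim_equal_reverseArrayChars : Prop := ∀ (array : List String), Dom_reverseArrayChars array → Spec_reverseArrayChars array (reverseArrayChars array)

-- ===== LEMMAS AND PROOFS =====

def pvPs (a : List String) (l r : Int) : List Int :=
  (PySem.List.pyRange l (r + 1) 1).filter (fun p => PySem.Str.strIsalnum (PySem.List.pyGetD a p ""))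

def pvScat (a : List String) (is : List Int) : List String :=
  (is.zip (is.reverse.map (fun i => PySem.List.pyGetD a i ""))).foldl
    (fun b p => PySem.List.pySetD b p.1 p.2) a

lemma pvGetD_setD_ne (a : List String) (p q : Int) (v : String) (h0 : 0 ≤ p) (h0q : 0 ≤ q)
    (hne : p ≠ q) :
    PySem.List.pyGetD (PySem.List.pySetD a q v) p "" = PySem.List.pyGetD a p "" := by
  rw [PySem.List.pySetD_of_nonneg _ _ h0q]
  simp only [PySem.List.pyGetD, PySem.List.pyGet?_of_nonneg _ h0]
  rw [List.getElem?_set_ne (by omega)]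

lemma pvFold_setD_comm (ps : List (Int × String)) (b : List String) (q : Int) (v : String)
    (hq : 0 ≤ q) (h : ∀ p ∈ ps, 0 ≤ p.1 ∧ p.1 ≠ q) :
    ps.foldl (fun c p => PySem.List.pySetD c p.1 p.2) (PySem.List.pySetD b q v)
      = PySem.List.pySetD (ps.foldl (fun c p => PySem.List.pySetD c p.1 p.2) b) q v := by
  induction ps generalizing b with
  | nil => rfl
  | cons x xs ih =>
    obtain ⟨hx0, hxq⟩ := h x (List.mem_cons_self ..)
    simp only [List.foldl_cons]
    rw [PySem.List.pySetD_of_nonneg _ _ hq, PySem.List.pySetD_of_nonneg _ _ hx0,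
        List.set_comm _ _ (by omega), ← PySem.List.pySetD_of_nonneg _ _ hq,
        ← PySem.List.pySetD_of_nonneg _ _ hx0,
        ih _ (fun p hp => h p (List.mem_cons_of_mem _ hp))]

lemma pvPs_mem (a : List String) (l r p : Int) (h : p ∈ pvPs a l r) : l ≤ p ∧ p ≤ r := by
  simp only [pvPs, List.mem_filter, PySem.List.mem_pyRange_one] at h
  omega

lemma pvPs_nil (a : List String) (l r : Int) (h : r < l) : pvPs a l r = [] := by
  simp [pvPs, PySem.List.pyRange_one_eq_nil (by omega : r + 1 ≤ l)]

lemma pvPs_head (a : List String) (l r : Int) (hlr : l ≤ r)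
    (hl : ¬ PySem.Str.strIsalnum (PySem.List.pyGetD a l "") = true) :
    pvPs a l r = pvPs a (l + 1) r := by
  rw [pvPs, PySem.List.pyRange_one_cons (by omega), List.filter_cons_of_neg (by simpa using hl)]
  rfl

lemma pvPs_tail (a : List String) (l r : Int) (hlr : l ≤ r)
    (hr : ¬ PySem.Str.strIsalnum (PySem.List.pyGetD a r "") = true) :
    pvPs a l r = pvPs a l (r - 1) := by
  have hr' : PySem.Str.strIsalnum (PySem.List.pyGetD a r "") = false := by simpa using hr
  rw [pvPs, PySem.List.pyRange_one_succ_right (by omega), List.filter_append,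
      List.filter_singleton]
  simp only [hr', cond_false, List.append_nil]
  have : r - 1 + 1 = r := by omega
  rw [pvPs, this]

lemma pvPs_both (a : List String) (l r : Int) (hlr : l < r)
    (hl : PySem.Str.strIsalnum (PySem.List.pyGetD a l "") = true)
    (hr : PySem.Str.strIsalnum (PySem.List.pyGetD a r "") = true) :
    pvPs a l r = l :: (pvPs a (l + 1) (r - 1) ++ [r]) := by
  rw [pvPs, PySem.List.pyRange_one_cons (by omega), List.filter_cons_of_pos (by simpa using hl),
      PySem.List.pyRange_one_succ_right (by omega : l + 1 ≤ r), List.filter_append,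
      List.filter_singleton]
  simp only [hr, cond_true]
  have : r - 1 + 1 = r := by omega
  rw [pvPs, this]

lemma pvPs_single (a : List String) (l : Int)
    (hl : PySem.Str.strIsalnum (PySem.List.pyGetD a l "") = true) :
    pvPs a l l = [l] := by
  rw [pvPs, PySem.List.pyRange_one_singleton, List.filter_singleton]
  have hl' : PySem.Chars.strIsalnum (PySem.List.pyGetD a l "").toList = true := by
    simpa [PySem.Str.strIsalnum] using hl
  simp [hl']

lemma pvGetD_of_get? (a : List String) (i : Int) (v : String)
    (h : PySem.List.pyGet? a i = some v) : PySem.List.pyGetD a i "" = v := by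
  simp [PySem.List.pyGetD, h]

theorem pvMain (a : List String) (l r : Int) :
    0 ≤ l → r < (a.length : Int) → pvLoopA a l r = pvScat a (pvPs a l r) := by
  induction a, l, r using pvLoopA.induct with
  | case1 arr l r hlr lv rv hgr hgl hb ih =>
    intro h1 h2
    have hl' : PySem.List.pyGetD arr l "" = lv := pvGetD_of_get? _ _ _ hgl
    have hr' : PySem.List.pyGetD arr r "" = rv := pvGetD_of_get? _ _ _ hgr
    obtain ⟨hbl, hbr⟩ : PySem.Str.strIsalnum lv = true ∧ PySem.Str.strIsalnum rv = true := by
      simpa using hb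
    have hstep : pvLoopA arr l r
        = pvLoopA (PySem.List.pySetD (PySem.List.pySetD arr l rv) r lv) (l + 1) (r - 1) := by
      rw [pvLoopA, dif_pos hlr, hgl, hgr]
      exact if_pos hb
    rcases eq_or_lt_of_le hlr with heq | hlt
    · subst heq
      have hrv : rv = lv := by rw [hgl] at hgr; exact (Option.some_inj.mp hgr).symm
      rw [hstep, pvLoopA, dif_neg (by omega)]
      rw [pvPs_single arr l (hl' ▸ hbl)]
      show _ = pvScat arr [l]
      simp only [pvScat, List.reverse_cons, List.reverse_nil, List.nil_append, List.map_cons,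
        List.map_nil, List.zip_cons_cons, List.zip_nil_right, List.foldl_cons, List.foldl_nil]
      rw [hrv, hl', PySem.List.pySetD_of_nonneg _ _ h1, PySem.List.pySetD_of_nonneg _ _ h1,
        List.set_set]
    · rw [hstep, ih (by omega) (by rw [PySem.List.length_pySetD, PySem.List.length_pySetD]; omega)]
      set M := pvPs arr (l + 1) (r - 1) with hM
      have hMmem : ∀ p ∈ M, l + 1 ≤ p ∧ p ≤ r - 1 := fun p hp => pvPs_mem _ _ _ _ hp
      have hps : pvPs (PySem.List.pySetD (PySem.List.pySetD arr l rv) r lv) (l + 1) (r - 1) = M := by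
        rw [hM]
        unfold pvPs
        apply List.filter_congr
        intro p hp
        have hpb := (PySem.List.mem_pyRange_one).mp hp
        rw [pvGetD_setD_ne _ p r _ (by omega) (by omega) (by omega),
            pvGetD_setD_ne _ p l _ (by omega) (by omega) (by omega)]
      rw [hps]
      -- gather values of the middle read from a' equal those read from arr
      have hvals : M.reverse.map (fun i => PySem.List.pyGetD
            (PySem.List.pySetD (PySem.List.pySetD arr l rv) r lv) i "")
          = M.reverse.map (fun i => PySem.List.pyGetD arr i "") := by
        apply List.map_congr_left
        intro p hp
        have := hMmem p (List.mem_reverse.mp hp)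
        rw [pvGetD_setD_ne _ p r _ (by omega) (by omega) (by omega),
            pvGetD_setD_ne _ p l _ (by omega) (by omega) (by omega)]
      rw [pvScat, hvals]
      set V := M.reverse.map (fun i => PySem.List.pyGetD arr i "") with hV
      have hlen : M.length = V.length := by simp [hV]
      have hcomm := pvFold_setD_comm (M.zip V) (PySem.List.pySetD arr l rv) r lv (by omega)
        (by
          intro p hp
          have := hMmem p.1 (List.of_mem_zip hp).1
          exact ⟨by omega, by omega⟩)
      rw [hcomm]
      -- now the B side
      rw [pvPs_both arr l r hlt (hl' ▸ hbl) (hr' ▸ hbr), pvScat]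
      simp only [List.reverse_cons, List.reverse_append, List.reverse_nil, List.nil_append,
        List.map_cons, List.map_append, List.map_nil, List.singleton_append]
      rw [← hM, ← hV]
      simp only [List.cons_append]
      rw [List.zip_cons_cons, List.zip_append hlen]
      simp only [List.zip_cons_cons, List.zip_nil_right, List.foldl_cons, List.foldl_append,
        List.foldl_nil]
      rw [hl', hr']
  | case2 arr l r hlr lv rv hgr hgl hb hbl ih =>
    intro h1 h2
    have hl' : PySem.List.pyGetD arr l "" = lv := pvGetD_of_get? _ _ _ hgl
    have hstep : pvLoopA arr l r = pvLoopA arr (l + 1) r := by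
      rw [pvLoopA, dif_pos hlr, hgl, hgr]
      exact (if_neg hb).trans (if_pos hbl)
    rw [hstep, ih (by omega) h2, pvPs_head arr l r hlr (by rw [hl']; simpa using hbl)]
  | case3 arr l r hlr lv rv hgr hgl hb hbl hbr ih =>
    intro h1 h2
    have hr' : PySem.List.pyGetD arr r "" = rv := pvGetD_of_get? _ _ _ hgr
    have hstep : pvLoopA arr l r = pvLoopA arr l (r - 1) := by
      rw [pvLoopA, dif_pos hlr, hgl, hgr]
      exact (if_neg hb).trans ((if_neg hbl).trans (if_pos hbr))
    rw [hstep, ih h1 (by omega), pvPs_tail arr l r hlr (by rw [hr']; simpa using hbr)]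
  | case4 arr l r hlr lv rv hgr hgl hb hbl hbr =>
    intro _ _
    have hx : PySem.Str.strIsalnum lv = true := by simpa using hbl
    have hy : PySem.Str.strIsalnum rv = true := by simpa using hbr
    exact absurd (by rw [hx, hy]; rfl) hb
  | case5 arr l r hlr hnone =>
    intro h1 h2
    exfalso
    have hl : l.toNat < arr.length := by omega
    have hr : r.toNat < arr.length := by omega
    exact hnone arr[l.toNat] arr[r.toNat]
      (by rw [PySem.List.pyGet?_of_nonneg _ h1]; exact List.getElem?_eq_getElem hl)
      (by rw [PySem.List.pyGet?_of_nonneg _ (by omega : (0:Int) ≤ r)]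
          exact List.getElem?_eq_getElem hr)
  | case6 arr l r hlr =>
    intro h1 h2
    rw [pvLoopA, dif_neg hlr, pvPs_nil _ _ _ (by omega)]
    rfl

lemma pvIdx (a : List String) :
    ((PySem.List.enumerate a).filter (fun p => PySem.Str.strIsalnum p.2)).map Prod.fst
      = pvPs a 0 ((a.length : Int) - 1) := by
  rw [PySem.List.enumerate_eq_map_pyRange a "", List.filter_map, List.map_map]
  have h1 : ((a.length : Int) - 1) + 1 = (a.length : Int) := by omega
  rw [pvPs, h1]
  have h2 : PySem.List.len a = (a.length : Int) := by simp [PySem.List.len]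
  rw [h2]
  simp [Function.comp_def]

lemma pvAlt (a : List String) :
    reverseArrayChars_alt a = pvScat a (pvPs a 0 ((a.length : Int) - 1)) := by
  simp only [reverseArrayChars_alt]
  rw [pvIdx, pvScat]

-- ===== VERDICT (by name: the statement is the Claim_ definition above) =====
theorem reverseArrayChars_spec : Claim_equal_reverseArrayChars := by
  unfold Claim_equal_reverseArrayChars Spec_reverseArrayChars
  intro a _
  by_cases h : a.length = 0
  · obtain rfl : a = [] := List.length_eq_zero_iff.mp h
    rfl
  · rw [reverseArrayChars, if_neg (by simpa using h), pvAlt,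
        pvMain a 0 ((a.length : Int) - 1) le_rfl (by omega)]
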